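-- pv_equiv track=rewrite | github.com/talliansaotome/ai-sysadmin | trigger_monitor.py | should_trigger_review
-- ===== SOURCE A (Python) =====
-- from typing import Dict, List, Any, Optional, Callable
--
-- def should_trigger_review(triggers: List[Dict[str, Any]]) -> bool:
--     """
--     Determine if triggers warrant a review model run
--
--     Args:
--         triggers: List of triggered events
--
--     Returns:
--         True if review should be triggered
--     """
--     if not triggers:
--         return False
--
--     # Critical triggers always warrant review
--     critical_count = sum(1 for t in triggers if t.get('severity') == 'critical')
--     if critical_count > 0:
--         return True
--
--     # High severity with multiple occurrences
--     high_count = sum(1 for t in triggers if t.get('severity') == 'high')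
--     if high_count >= 2:
--         return True
--
--     # Many medium severity issues
--     medium_count = sum(1 for t in triggers if t.get('severity') == 'medium')
--     if medium_count >= 3:
--         return True
--
--     return False
-- ===== SOURCE B (Python) =====
-- def should_trigger_review(triggers):
--     """
--     Determine if triggers warrant a review model run.
--
--     One aggregation pass builds a severity frequency table; the thresholds
--     are then read off the table (same priority order as before).
--     """
--     if not triggers:
--         return False
--     counts = {}
--     for t in triggers:
--         s = t.get('severity')
--         counts[s] = counts.get(s, 0) + 1
--     return (counts.get('critical', 0) > 0
--             or counts.get('high', 0) >= 2
--             or counts.get('medium', 0) >= 3)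
-- ===== Notes on version B (the rewrite author's own statement) =====
-- stated objective: simpler
-- what changed: Replaces three separate filtered scans over the trigger list with a single aggregation pass building a severity frequency table, then evaluates the thresholds as pure table lookups.
import Mathlib
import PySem

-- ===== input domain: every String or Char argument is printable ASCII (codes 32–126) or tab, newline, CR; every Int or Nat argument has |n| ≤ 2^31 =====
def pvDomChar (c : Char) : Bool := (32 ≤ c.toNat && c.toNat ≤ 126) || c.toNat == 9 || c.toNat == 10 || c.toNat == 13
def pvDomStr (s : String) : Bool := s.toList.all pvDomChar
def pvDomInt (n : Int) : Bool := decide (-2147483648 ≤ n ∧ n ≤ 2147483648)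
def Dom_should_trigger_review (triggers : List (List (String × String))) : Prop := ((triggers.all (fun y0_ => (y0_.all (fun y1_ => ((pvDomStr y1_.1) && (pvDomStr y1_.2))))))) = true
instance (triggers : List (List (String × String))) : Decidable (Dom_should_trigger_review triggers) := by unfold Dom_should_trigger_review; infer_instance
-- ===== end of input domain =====

-- B replaces A's three filtered scans by one pass building a severity frequency table, then threshold lookups (simpler; same O(n)).


-- ===== PORT A =====
def should_trigger_review (triggers : List (List (String × String))) : Bool :=
  if triggers == [] then false
  else
    let critical_count : Int :=
      triggers.foldl (fun acc t => if (PySem.Dict.mk t).get? "severity" == some "critical" then acc + 1 else acc) 0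
    if critical_count > 0 then true
    else
      let high_count : Int :=
        triggers.foldl (fun acc t => if (PySem.Dict.mk t).get? "severity" == some "high" then acc + 1 else acc) 0
      if high_count ≥ 2 then true
      else
        let medium_count : Int :=
          triggers.foldl (fun acc t => if (PySem.Dict.mk t).get? "severity" == some "medium" then acc + 1 else acc) 0
        if medium_count ≥ 3 then true
        else false

-- ===== PORT B =====
def should_trigger_review_alt (triggers : List (List (String × String))) : Bool :=
  if triggers == [] then false
  else
    let counts : PySem.Dict (Option String) Int :=
      triggers.foldl
        (fun d t =>
          let s := (PySem.Dict.mk t).get? "severity"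
          d.insert s (d.getD s 0 + 1))
        PySem.Dict.empty
    decide (counts.getD (some "critical") 0 > 0) ||
      decide (counts.getD (some "high") 0 ≥ 2) ||
        decide (counts.getD (some "medium") 0 ≥ 3)

-- ===== PRECONDITION & SPEC =====
def Spec_should_trigger_review (triggers : List (List (String × String))) (out : Bool) : Prop := out = should_trigger_review_alt triggers
instance (triggers : List (List (String × String))) (out : Bool) : Decidable (Spec_should_trigger_review triggers out) := by unfold Spec_should_trigger_review; infer_instance

-- ===== CLAIM (what is proved, stated in full; the proofs are below) =====
def Claim_equal_should_trigger_review : Prop := ∀ (triggers : List (List (String × String))), Dom_should_trigger_review triggers → Spec_should_trigger_review triggers (should_trigger_review triggers)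

-- ===== LEMMAS AND PROOFS =====

-- A's 0/1-sum over triggers counts the severities equal to v, i.e. the count of v in the mapped severity list.
theorem foldl_if_count (triggers : List (List (String × String))) (v : String) (n : Int) :
    triggers.foldl (fun acc t => if (PySem.Dict.mk t).get? "severity" == some v then acc + 1 else acc) n
      = n + ((triggers.map (fun t => (PySem.Dict.mk t).get? "severity")).count (some v) : Int) := by
  induction triggers generalizing n with
  | nil => simp
  | cons t ts ih =>
    simp only [List.foldl_cons, List.map_cons, List.count_cons, ih]
    by_cases h : (PySem.Dict.mk t).get? "severity" == some v
    · simp [h]; ring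
    · simp [h]

-- B's table lookup equals the count of v among the severities (invariant of the counting loop, any starting table d).
theorem counts_getD_gen (triggers : List (List (String × String))) (v : Option String)
    (d : PySem.Dict (Option String) Int) :
    (triggers.foldl
        (fun d t =>
          let s := (PySem.Dict.mk t).get? "severity"
          d.insert s (d.getD s 0 + 1))
        d).getD v 0
      = d.getD v 0 + ((triggers.map (fun t => (PySem.Dict.mk t).get? "severity")).count v : Int) := by
  induction triggers generalizing d with
  | nil => simp
  | cons t ts ih =>
    simp only [List.foldl_cons, List.map_cons, List.count_cons, ih]
    by_cases hk : (PySem.Dict.mk t).get? "severity" = v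
    · simp [pysem, hk]; ring
    · simp [PySem.Dict.getD_insert, hk, Ne.symm hk]

-- ===== VERDICT (by name: the statement is the Claim_ definition above) =====
theorem should_trigger_review_spec : Claim_equal_should_trigger_review := by
  intro triggers _
  unfold Spec_should_trigger_review should_trigger_review should_trigger_review_alt
  by_cases hnil : triggers == []
  · simp [hnil]
  · simp only [hnil, Bool.false_eq_true, if_false]
    simp only [foldl_if_count, counts_getD_gen, PySem.Dict.getD_empty, zero_add]
    split_ifs with h1 h2 h3 <;> simp_all
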